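-- pv_equiv track=rewrite | github.com/filipeom/CSP | tdh-ddh.py | sampleB
-- ===== SOURCE A (Python) =====
-- def sampleB(A, p, g, n, s, t, i):
--     B = []
--     for j in range(n):
--         B.append([])
--         for b in range(2 * i, 2 * (i + 1)):
--             u_jb = (pow(A[j][b], s, p) * pow(g, t, p)) % p if j == i and b == (2 * i + 1) else pow(A[j][b], s, p)
--             B[j].append(u_jb)
--     return B
-- ===== SOURCE B (Python) =====
-- def sampleB(A, p, g, n, s, t, i):
--     # Column-major: build each of the two columns as its own list over j,
--     # apply the tweak to the single entry col1[i], then transpose into rows.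
--     col0 = [pow(A[j][2 * i], s, p) for j in range(n)]
--     col1 = [pow(A[j][2 * i + 1], s, p) for j in range(n)]
--     if 0 <= i < n:
--         col1[i] = col1[i] * pow(g, t, p) % p
--     return [[x, y] for x, y in zip(col0, col1)]
-- ===== Notes on version B (the rewrite author's own statement) =====
-- stated objective: alternative
-- what changed: B is column-major: it builds the two columns col0 and col1 as separate lists over j, applies the tweak factor pow(g,t,p) to the single entry col1[i], and then transposes with zip into the rows, instead of A's row-major nested appending loops with a per-element j==i and b==2*i+1 conditional.
-- outside the precondition, e.g. on sampleB([[3, 3]], 5, 2, 1, -1, 0, 0): A returns [[2, 2]], B returns [[2, 2]]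
import Mathlib
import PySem

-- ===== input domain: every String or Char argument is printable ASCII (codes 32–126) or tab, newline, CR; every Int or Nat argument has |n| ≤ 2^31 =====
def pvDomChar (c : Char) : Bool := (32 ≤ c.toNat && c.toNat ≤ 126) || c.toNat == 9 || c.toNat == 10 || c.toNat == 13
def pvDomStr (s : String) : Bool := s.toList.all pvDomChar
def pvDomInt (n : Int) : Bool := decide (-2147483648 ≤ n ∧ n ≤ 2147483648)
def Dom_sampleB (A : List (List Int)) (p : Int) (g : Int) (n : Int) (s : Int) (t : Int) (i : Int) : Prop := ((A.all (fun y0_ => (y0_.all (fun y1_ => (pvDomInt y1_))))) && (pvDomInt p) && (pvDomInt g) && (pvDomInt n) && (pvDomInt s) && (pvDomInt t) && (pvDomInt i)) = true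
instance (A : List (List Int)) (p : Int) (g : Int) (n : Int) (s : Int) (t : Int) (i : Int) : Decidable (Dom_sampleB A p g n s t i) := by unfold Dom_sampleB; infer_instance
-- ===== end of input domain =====

-- B builds the matrix column-major (two column lists, tweak one entry of column 1, transpose by
-- zip) instead of A's row-major nested loops with a per-element conditional (objective: alternative).

-- ===== PORT A =====
-- A[j][b], Python semantics (negative indexes wrap); the defaults are unreachable under Pre_.
def pvCell (A : List (List Int)) (j b : Int) : Int :=
  (PySem.List.pyGet? ((PySem.List.pyGet? A j).getD []) b).getD 0

-- pow(x, s, p) is PySem.Int.powMod with a Nat exponent; Pre_ guarantees the exponent is ≥ 0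
-- wherever the Python evaluates the pow, so .toNat is exact there.
def sampleB (A : List (List Int)) (p : Int) (g : Int) (n : Int) (s : Int) (t : Int) (i : Int) : List (List Int) :=
  (PySem.List.pyRange 0 n 1).foldl
    (fun B j =>
      -- B.append([]) followed by appending each u_jb to that fresh last row B[j]
      B ++ [ (PySem.List.pyRange (2 * i) (2 * (i + 1)) 1).foldl
               (fun row b =>
                 row ++ [ if j == i && b == 2 * i + 1 then
                            PySem.Int.mod (PySem.Int.powMod (pvCell A j b) s.toNat p *
                                           PySem.Int.powMod g t.toNat p) p
                          else
                            PySem.Int.powMod (pvCell A j b) s.toNat p ])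
               [] ])
    []

-- ===== PORT B =====
def sampleB_alt (A : List (List Int)) (p : Int) (g : Int) (n : Int) (s : Int) (t : Int) (i : Int) : List (List Int) :=
  let col0 := (PySem.List.pyRange 0 n 1).map
    (fun j => PySem.Int.powMod (pvCell A j (2 * i)) s.toNat p)
  let col1 := (PySem.List.pyRange 0 n 1).map
    (fun j => PySem.Int.powMod (pvCell A j (2 * i + 1)) s.toNat p)
  let col1' := if 0 ≤ i ∧ i < n then
      col1.set i.toNat
        (PySem.Int.mod ((PySem.List.pyGet? col1 i).getD 0 * PySem.Int.powMod g t.toNat p) p)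
    else col1
  (col0.zip col1').map (fun xy => [xy.1, xy.2])

-- ===== PRECONDITION & SPEC =====
-- Pre_ excludes exactly the inputs on which the Python A raises (IndexError on a missing row or
-- column, ValueError on pow with modulus 0) plus the negative exponents s,t at a position the
-- Python evaluates them: there Python pow either raises ValueError or computes a modular inverse,
-- which the Nat-exponent model does not cover even when A happens to return (B returns the same
-- value there; see the cite).
def Pre_sampleB (A : List (List Int)) (p : Int) (g : Int) (n : Int) (s : Int) (t : Int) (i : Int) : Prop :=
  (0 < n → p ≠ 0 ∧ 0 ≤ s ∧ n ≤ (A.length : Int) ∧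
    ∀ row ∈ A.take n.toNat, -(row.length : Int) ≤ 2 * i ∧ 2 * i + 1 < (row.length : Int)) ∧
  (0 ≤ i ∧ i < n → 0 ≤ t)
instance (A : List (List Int)) (p : Int) (g : Int) (n : Int) (s : Int) (t : Int) (i : Int) : Decidable (Pre_sampleB A p g n s t i) := by unfold Pre_sampleB; infer_instance

def pvWitness_sampleB : List (List Int) × Int × Int × Int × Int × Int × Int :=
  ([[2, 3], [4, 5]], 7, 3, 2, 2, 1, 0)

def Spec_sampleB (A : List (List Int)) (p : Int) (g : Int) (n : Int) (s : Int) (t : Int) (i : Int) (out : List (List Int)) : Prop := out = sampleB_alt A p g n s t i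
instance (A : List (List Int)) (p : Int) (g : Int) (n : Int) (s : Int) (t : Int) (i : Int) (out : List (List Int)) : Decidable (Spec_sampleB A p g n s t i out) := by unfold Spec_sampleB; infer_instance

-- ===== CLAIM (what is proved, stated in full; the proofs are below) =====
def Claim_equal_sampleB : Prop := ∀ (A : List (List Int)) (p : Int) (g : Int) (n : Int) (s : Int) (t : Int) (i : Int), Dom_sampleB A p g n s t i → Pre_sampleB A p g n s t i → Spec_sampleB A p g n s t i (sampleB A p g n s t i)

-- ===== LEMMAS AND PROOFS =====

-- A's inner loop: range(2i, 2(i+1)) is the two columns 2i, 2i+1.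
theorem pvRange_two (i : Int) : PySem.List.pyRange (2 * i) (2 * (i + 1)) 1 = [2 * i, 2 * i + 1] := by
  rw [PySem.List.pyRange_one_cons (by omega), PySem.List.pyRange_one_cons (by omega)]
  have : PySem.List.pyRange (2 * i + 1 + 1) (2 * (i + 1)) 1 = [] := by
    simp [PySem.List.pyRange]; omega
  rw [this]

theorem pyRange_zero_getElem (n : Int) (k : Nat) (h : k < (PySem.List.pyRange 0 n 1).length) :
    (PySem.List.pyRange 0 n 1)[k] = (k : Int) := by
  simp [PySem.List.pyRange_of_pos 0 n one_pos] at h ⊢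

-- ===== VERDICT (by name: the statement is the Claim_ definition above) =====
theorem sampleB_spec : Claim_equal_sampleB := by
  intro A p g n s t i _hDom _hPre
  unfold Spec_sampleB sampleB sampleB_alt
  rw [pvRange_two]
  simp only [PySem.List.foldl_append_singleton_eq_map, List.nil_append, List.map_cons,
    List.map_nil]
  by_cases hin : 0 ≤ i ∧ i < n
  · rw [if_pos hin]
    have hi : i = ((i.toNat : Nat) : Int) := by omega
    apply List.ext_getElem
    · simp [List.length_zip]
    · intro k hk hk'
      have hkk := pyRange_zero_getElem n k (by simpa using hk)
      have hlen : (PySem.List.pyRange 0 n 1).length = n.toNat := by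
        simpa using PySem.List.length_pyRange_one 0 n
      simp only [List.getElem_map, List.getElem_zip, List.getElem_set, hkk]
      by_cases hke : i.toNat = k
      · have hik : (k : Int) = i := by omega
        rw [if_pos hke]
        have hget : PySem.List.pyGet?
            ((PySem.List.pyRange 0 n 1).map
              (fun j => PySem.Int.powMod (pvCell A j (2 * i + 1)) s.toNat p)) i = some
            (PySem.Int.powMod (pvCell A i (2 * i + 1)) s.toNat p) := by
          rw [hi, PySem.List.pyGet?_natCast]
          rw [List.getElem?_eq_getElem (by simp [hlen]; omega)]
          simp only [List.getElem_map]
          rw [pyRange_zero_getElem n i.toNat (by simp [hlen]; omega)]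
        rw [hget]
        simp [hik]
      · have hik : ¬ ((k : Int) = i) := by omega
        rw [if_neg hke]
        simp [hik]
  · rw [if_neg hin]
    have hzip : ∀ (f0 f1 : Int → Int) (l : List Int),
        ((l.map f0).zip (l.map f1)).map (fun xy => [xy.1, xy.2]) = l.map (fun j => [f0 j, f1 j]) := by
      intro f0 f1 l
      induction l with
      | nil => rfl
      | cons a l ih => simp [ih]
    rw [hzip]
    apply List.map_congr_left
    intro j hj
    rw [PySem.List.mem_pyRange_iff_of_pos one_pos] at hj
    have hij : ¬ (j = i) := by omega
    simp [hij]
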